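-- pv_equiv track=rewrite | github.com/stefanopalmieri/DistinctionStructures | delta2_74181.py | _alu_logic
-- ===== SOURCE A (Python) =====
-- def _alu_logic(selector: int, a: int, b: int) -> int:
--     """Compute 74181 logic operation (active-high)."""
--     # Operate bitwise on each of the 4 bits
--     result = 0
--     for bit in range(4):
--         ai = (a >> bit) & 1
--         bi = (b >> bit) & 1
--         # The 74181 logic functions (active-high):
--         fi = _logic_bit(selector, ai, bi)
--         result |= (fi << bit)
--     return result & 0xF
--
-- def _logic_bit(selector: int, ai: int, bi: int) -> int:
--     """Compute one bit of the 74181 logic function."""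
--     s0 = (selector >> 0) & 1
--     s1 = (selector >> 1) & 1
--     s2 = (selector >> 2) & 1
--     s3 = (selector >> 3) & 1
--
--     # 74181 active-high logic equations per bit:
--     # The logic function is: F = NOT(
--     #   (NOT A AND s0 AND NOT B) OR
--     #   (NOT A AND s1 AND B) OR
--     #   (A AND s2 AND NOT B) OR
--     #   (A AND s3 AND B)
--     # )
--     # Wait, let me use the standard formulation.
--     # Actually, the 74181 logic output per bit (active-high) is:
--     #
--     # For the logic functions (M=H), the output per bit is determined by
--     # the select lines and input bits. The truth table for active-high:
--
--     na = 1 - ai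
--     nb = 1 - bi
--
--     # Generate and propagate terms
--     t0 = na & s0 & nb
--     t1 = na & s1 & bi
--     t2 = ai & s2 & nb
--     t3 = ai & s3 & bi
--
--     # Logic output (active-high): NOT of the OR of terms
--     # Wait, this gives the COMPLEMENT. Let me just use the truth table directly.
--     # The 74181 active-high logic table:
--     # S=0000: NOT A        S=0001: NOT(A OR B)   S=0010: (NOT A) AND B
--     # S=0011: 0            S=0100: NOT(A AND B)  S=0101: NOT B
--     # S=0110: A XOR B      S=0111: A AND NOT B   S=1000: NOT A OR B
--     # S=1001: NOT(A XOR B) S=1010: B             S=1011: A AND B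
--     # S=1100: 1            S=1101: A OR NOT B    S=1110: A OR B
--     # S=1111: A
--
--     _table = [
--         na,                           # 0: NOT A
--         1 - (ai | bi),                # 1: NOR
--         na & bi,                      # 2: (NOT A) AND B
--         0,                            # 3: Logical 0
--         1 - (ai & bi),               # 4: NAND
--         nb,                           # 5: NOT B
--         ai ^ bi,                      # 6: XOR
--         ai & nb,                      # 7: A AND (NOT B)
--         na | bi,                      # 8: (NOT A) OR B
--         1 - (ai ^ bi),               # 9: XNOR
--         bi,                           # A: B
--         ai & bi,                      # B: A AND B
--         1,                            # C: Logical 1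
--         ai | nb,                      # D: A OR (NOT B)
--         ai | bi,                      # E: A OR B
--         ai,                           # F: A
--     ]
--     return _table[selector]
-- ===== SOURCE B (Python) =====
-- def _alu_logic(selector: int, a: int, b: int) -> int:
--     """Compute 74181 logic operation (active-high), whole-nibble at once."""
--     am = a % 16
--     bm = b % 16
--     na = 15 - am          # NOT A within the 4-bit nibble
--     nb = 15 - bm          # NOT B within the 4-bit nibble
--     table = [
--         na,               # 0: NOT A
--         15 - (am | bm),   # 1: NOR
--         na & bm,          # 2: (NOT A) AND B
--         0,                # 3: Logical 0
--         15 - (am & bm),   # 4: NAND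
--         nb,               # 5: NOT B
--         am ^ bm,          # 6: XOR
--         am & nb,          # 7: A AND (NOT B)
--         na | bm,          # 8: (NOT A) OR B
--         15 - (am ^ bm),   # 9: XNOR
--         bm,               # A: B
--         am & bm,          # B: A AND B
--         15,               # C: Logical 1
--         am | nb,          # D: A OR (NOT B)
--         am | bm,          # E: A OR B
--         am,               # F: A
--     ]
--     return table[selector]
-- ===== Notes on version B (the rewrite author's own statement) =====
-- stated objective: simpler
-- what changed: B drops the per-bit loop and the _logic_bit helper: it masks both operands to one nibble up front and selects one whole-nibble expression (AND/OR/XOR/complement on the 4-bit values) from the same 16-entry table, computing all four bits at once.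
import Mathlib
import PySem

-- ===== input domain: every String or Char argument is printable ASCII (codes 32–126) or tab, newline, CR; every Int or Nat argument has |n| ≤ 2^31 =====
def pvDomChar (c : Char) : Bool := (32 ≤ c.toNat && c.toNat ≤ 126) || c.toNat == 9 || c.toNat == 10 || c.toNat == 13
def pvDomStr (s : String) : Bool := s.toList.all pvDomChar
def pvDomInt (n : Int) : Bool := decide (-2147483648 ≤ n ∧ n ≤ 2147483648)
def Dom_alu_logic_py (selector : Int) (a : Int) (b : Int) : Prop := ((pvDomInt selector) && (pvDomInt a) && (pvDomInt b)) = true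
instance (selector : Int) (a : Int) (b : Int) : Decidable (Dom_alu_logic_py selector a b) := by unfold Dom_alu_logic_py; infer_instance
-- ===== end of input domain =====

-- B replaces the per-bit loop and _logic_bit helper by one whole-nibble table lookup (simpler decomposition).


-- ===== PORT A =====
-- _logic_bit, step for step.  _table[selector] raises IndexError outside [-16,15]; pyGet? is none there
-- (excluded by Pre_), and we take getD 0 to stay total.
def logic_bit_py (selector : Int) (ai : Int) (bi : Int) : Int :=
  let _s0 := PySem.Int.band (selector >>> 0) 1
  let _s1 := PySem.Int.band (selector >>> 1) 1
  let _s2 := PySem.Int.band (selector >>> 2) 1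
  let _s3 := PySem.Int.band (selector >>> 3) 1
  let na := 1 - ai
  let nb := 1 - bi
  let _t0 := PySem.Int.band (PySem.Int.band na _s0) nb
  let _t1 := PySem.Int.band (PySem.Int.band na _s1) bi
  let _t2 := PySem.Int.band (PySem.Int.band ai _s2) nb
  let _t3 := PySem.Int.band (PySem.Int.band ai _s3) bi
  let _table : List Int :=
    [ na,
      1 - (PySem.Int.bor ai bi),
      PySem.Int.band na bi,
      0,
      1 - (PySem.Int.band ai bi),
      nb,
      PySem.Int.bxor ai bi,
      PySem.Int.band ai nb,
      PySem.Int.bor na bi,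
      1 - (PySem.Int.bxor ai bi),
      bi,
      PySem.Int.band ai bi,
      1,
      PySem.Int.bor ai nb,
      PySem.Int.bor ai bi,
      ai ]
  (PySem.List.pyGet? _table selector).getD 0

-- _alu_logic: bitwise loop over range(4)
def alu_logic_py (selector : Int) (a : Int) (b : Int) : Int :=
  let result : Int :=
    (PySem.List.pyRange 0 4 1).foldl (fun result bit =>
      let k : Nat := bit.toNat  -- the loop index 0..3, as a shift count
      let ai := PySem.Int.band (a >>> k) 1
      let bi := PySem.Int.band (b >>> k) 1
      let fi := logic_bit_py selector ai bi
      PySem.Int.bor result (fi <<< k)) 0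
  PySem.Int.band result 15

-- ===== PORT B =====
def alu_logic_py_alt (selector : Int) (a : Int) (b : Int) : Int :=
  let am := PySem.Int.mod a 16
  let bm := PySem.Int.mod b 16
  let na := 15 - am
  let nb := 15 - bm
  let table : List Int :=
    [ na,
      15 - (PySem.Int.bor am bm),
      PySem.Int.band na bm,
      0,
      15 - (PySem.Int.band am bm),
      nb,
      PySem.Int.bxor am bm,
      PySem.Int.band am nb,
      PySem.Int.bor na bm,
      15 - (PySem.Int.bxor am bm),
      bm,
      PySem.Int.band am bm,
      15,
      PySem.Int.bor am nb,
      PySem.Int.bor am bm,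
      am ]
  (PySem.List.pyGet? table selector).getD 0

-- ===== PRECONDITION & SPEC =====
-- Pre_ excludes exactly the selectors on which Python A raises IndexError (table index outside [-16,15]).
def Pre_alu_logic_py (selector : Int) (a : Int) (b : Int) : Prop := -16 ≤ selector ∧ selector ≤ 15
instance (selector : Int) (a : Int) (b : Int) : Decidable (Pre_alu_logic_py selector a b) := by unfold Pre_alu_logic_py; infer_instance
def pvWitness_alu_logic_py : Int × Int × Int := (6, 9, 5)

def Spec_alu_logic_py (selector : Int) (a : Int) (b : Int) (out : Int) : Prop := out = alu_logic_py_alt selector a b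
instance (selector : Int) (a : Int) (b : Int) (out : Int) : Decidable (Spec_alu_logic_py selector a b out) := by unfold Spec_alu_logic_py; infer_instance

-- ===== CLAIM (what is proved, stated in full; the proofs are below) =====
def Claim_equal_alu_logic_py : Prop := ∀ (selector : Int) (a : Int) (b : Int), Dom_alu_logic_py selector a b → Pre_alu_logic_py selector a b → Spec_alu_logic_py selector a b (alu_logic_py selector a b)

-- ===== LEMMAS AND PROOFS =====
theorem Lr_m16 (a b : Int) : logic_bit_py (-16) a b = 1 - a := rfl
theorem Br_m16 (x y : Int) : alu_logic_py_alt (-16) x y = 15 - (PySem.Int.mod x 16) := rfl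
theorem Lr_m15 (a b : Int) : logic_bit_py (-15) a b = 1 - PySem.Int.bor a b := rfl
theorem Br_m15 (x y : Int) : alu_logic_py_alt (-15) x y = 15 - PySem.Int.bor (PySem.Int.mod x 16) (PySem.Int.mod y 16) := rfl
theorem Lr_m14 (a b : Int) : logic_bit_py (-14) a b = PySem.Int.band (1 - a) b := rfl
theorem Br_m14 (x y : Int) : alu_logic_py_alt (-14) x y = PySem.Int.band (15 - (PySem.Int.mod x 16)) (PySem.Int.mod y 16) := rfl
theorem Lr_m13 (a b : Int) : logic_bit_py (-13) a b = 0 := rfl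
theorem Br_m13 (x y : Int) : alu_logic_py_alt (-13) x y = 0 := rfl
theorem Lr_m12 (a b : Int) : logic_bit_py (-12) a b = 1 - PySem.Int.band a b := rfl
theorem Br_m12 (x y : Int) : alu_logic_py_alt (-12) x y = 15 - PySem.Int.band (PySem.Int.mod x 16) (PySem.Int.mod y 16) := rfl
theorem Lr_m11 (a b : Int) : logic_bit_py (-11) a b = 1 - b := rfl
theorem Br_m11 (x y : Int) : alu_logic_py_alt (-11) x y = 15 - (PySem.Int.mod y 16) := rfl
theorem Lr_m10 (a b : Int) : logic_bit_py (-10) a b = PySem.Int.bxor a b := rfl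
theorem Br_m10 (x y : Int) : alu_logic_py_alt (-10) x y = PySem.Int.bxor (PySem.Int.mod x 16) (PySem.Int.mod y 16) := rfl
theorem Lr_m9 (a b : Int) : logic_bit_py (-9) a b = PySem.Int.band a (1 - b) := rfl
theorem Br_m9 (x y : Int) : alu_logic_py_alt (-9) x y = PySem.Int.band (PySem.Int.mod x 16) (15 - (PySem.Int.mod y 16)) := rfl
theorem Lr_m8 (a b : Int) : logic_bit_py (-8) a b = PySem.Int.bor (1 - a) b := rfl
theorem Br_m8 (x y : Int) : alu_logic_py_alt (-8) x y = PySem.Int.bor (15 - (PySem.Int.mod x 16)) (PySem.Int.mod y 16) := rfl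
theorem Lr_m7 (a b : Int) : logic_bit_py (-7) a b = 1 - PySem.Int.bxor a b := rfl
theorem Br_m7 (x y : Int) : alu_logic_py_alt (-7) x y = 15 - PySem.Int.bxor (PySem.Int.mod x 16) (PySem.Int.mod y 16) := rfl
theorem Lr_m6 (a b : Int) : logic_bit_py (-6) a b = b := rfl
theorem Br_m6 (x y : Int) : alu_logic_py_alt (-6) x y = (PySem.Int.mod y 16) := rfl
theorem Lr_m5 (a b : Int) : logic_bit_py (-5) a b = PySem.Int.band a b := rfl
theorem Br_m5 (x y : Int) : alu_logic_py_alt (-5) x y = PySem.Int.band (PySem.Int.mod x 16) (PySem.Int.mod y 16) := rfl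
theorem Lr_m4 (a b : Int) : logic_bit_py (-4) a b = 1 := rfl
theorem Br_m4 (x y : Int) : alu_logic_py_alt (-4) x y = 15 := rfl
theorem Lr_m3 (a b : Int) : logic_bit_py (-3) a b = PySem.Int.bor a (1 - b) := rfl
theorem Br_m3 (x y : Int) : alu_logic_py_alt (-3) x y = PySem.Int.bor (PySem.Int.mod x 16) (15 - (PySem.Int.mod y 16)) := rfl
theorem Lr_m2 (a b : Int) : logic_bit_py (-2) a b = PySem.Int.bor a b := rfl
theorem Br_m2 (x y : Int) : alu_logic_py_alt (-2) x y = PySem.Int.bor (PySem.Int.mod x 16) (PySem.Int.mod y 16) := rfl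
theorem Lr_m1 (a b : Int) : logic_bit_py (-1) a b = a := rfl
theorem Br_m1 (x y : Int) : alu_logic_py_alt (-1) x y = (PySem.Int.mod x 16) := rfl
theorem Lr_0 (a b : Int) : logic_bit_py (0) a b = 1 - a := rfl
theorem Br_0 (x y : Int) : alu_logic_py_alt (0) x y = 15 - (PySem.Int.mod x 16) := rfl
theorem Lr_1 (a b : Int) : logic_bit_py (1) a b = 1 - PySem.Int.bor a b := rfl
theorem Br_1 (x y : Int) : alu_logic_py_alt (1) x y = 15 - PySem.Int.bor (PySem.Int.mod x 16) (PySem.Int.mod y 16) := rfl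
theorem Lr_2 (a b : Int) : logic_bit_py (2) a b = PySem.Int.band (1 - a) b := rfl
theorem Br_2 (x y : Int) : alu_logic_py_alt (2) x y = PySem.Int.band (15 - (PySem.Int.mod x 16)) (PySem.Int.mod y 16) := rfl
theorem Lr_3 (a b : Int) : logic_bit_py (3) a b = 0 := rfl
theorem Br_3 (x y : Int) : alu_logic_py_alt (3) x y = 0 := rfl
theorem Lr_4 (a b : Int) : logic_bit_py (4) a b = 1 - PySem.Int.band a b := rfl
theorem Br_4 (x y : Int) : alu_logic_py_alt (4) x y = 15 - PySem.Int.band (PySem.Int.mod x 16) (PySem.Int.mod y 16) := rfl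
theorem Lr_5 (a b : Int) : logic_bit_py (5) a b = 1 - b := rfl
theorem Br_5 (x y : Int) : alu_logic_py_alt (5) x y = 15 - (PySem.Int.mod y 16) := rfl
theorem Lr_6 (a b : Int) : logic_bit_py (6) a b = PySem.Int.bxor a b := rfl
theorem Br_6 (x y : Int) : alu_logic_py_alt (6) x y = PySem.Int.bxor (PySem.Int.mod x 16) (PySem.Int.mod y 16) := rfl
theorem Lr_7 (a b : Int) : logic_bit_py (7) a b = PySem.Int.band a (1 - b) := rfl
theorem Br_7 (x y : Int) : alu_logic_py_alt (7) x y = PySem.Int.band (PySem.Int.mod x 16) (15 - (PySem.Int.mod y 16)) := rfl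
theorem Lr_8 (a b : Int) : logic_bit_py (8) a b = PySem.Int.bor (1 - a) b := rfl
theorem Br_8 (x y : Int) : alu_logic_py_alt (8) x y = PySem.Int.bor (15 - (PySem.Int.mod x 16)) (PySem.Int.mod y 16) := rfl
theorem Lr_9 (a b : Int) : logic_bit_py (9) a b = 1 - PySem.Int.bxor a b := rfl
theorem Br_9 (x y : Int) : alu_logic_py_alt (9) x y = 15 - PySem.Int.bxor (PySem.Int.mod x 16) (PySem.Int.mod y 16) := rfl
theorem Lr_10 (a b : Int) : logic_bit_py (10) a b = b := rfl
theorem Br_10 (x y : Int) : alu_logic_py_alt (10) x y = (PySem.Int.mod y 16) := rfl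
theorem Lr_11 (a b : Int) : logic_bit_py (11) a b = PySem.Int.band a b := rfl
theorem Br_11 (x y : Int) : alu_logic_py_alt (11) x y = PySem.Int.band (PySem.Int.mod x 16) (PySem.Int.mod y 16) := rfl
theorem Lr_12 (a b : Int) : logic_bit_py (12) a b = 1 := rfl
theorem Br_12 (x y : Int) : alu_logic_py_alt (12) x y = 15 := rfl
theorem Lr_13 (a b : Int) : logic_bit_py (13) a b = PySem.Int.bor a (1 - b) := rfl
theorem Br_13 (x y : Int) : alu_logic_py_alt (13) x y = PySem.Int.bor (PySem.Int.mod x 16) (15 - (PySem.Int.mod y 16)) := rfl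
theorem Lr_14 (a b : Int) : logic_bit_py (14) a b = PySem.Int.bor a b := rfl
theorem Br_14 (x y : Int) : alu_logic_py_alt (14) x y = PySem.Int.bor (PySem.Int.mod x 16) (PySem.Int.mod y 16) := rfl
theorem Lr_15 (a b : Int) : logic_bit_py (15) a b = a := rfl
theorem Br_15 (x y : Int) : alu_logic_py_alt (15) x y = (PySem.Int.mod x 16) := rfl

theorem band_bits (a0 a1 a2 a3 b0 b1 b2 b3 : Int) (ha0 : a0 = 0 ∨ a0 = 1) (ha1 : a1 = 0 ∨ a1 = 1) (ha2 : a2 = 0 ∨ a2 = 1) (ha3 : a3 = 0 ∨ a3 = 1) (hb0 : b0 = 0 ∨ b0 = 1) (hb1 : b1 = 0 ∨ b1 = 1) (hb2 : b2 = 0 ∨ b2 = 1) (hb3 : b3 = 0 ∨ b3 = 1) :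
    PySem.Int.band (a0 + 2 * a1 + 4 * a2 + 8 * a3) (b0 + 2 * b1 + 4 * b2 + 8 * b3)
      = PySem.Int.band a0 b0 + 2 * PySem.Int.band a1 b1 + 4 * PySem.Int.band a2 b2 + 8 * PySem.Int.band a3 b3 := by
  rcases ha0 with rfl|rfl <;> rcases ha1 with rfl|rfl <;> rcases ha2 with rfl|rfl <;> rcases ha3 with rfl|rfl <;> rcases hb0 with rfl|rfl <;> rcases hb1 with rfl|rfl <;> rcases hb2 with rfl|rfl <;> rcases hb3 with rfl|rfl <;> decide
theorem bor_bits (a0 a1 a2 a3 b0 b1 b2 b3 : Int) (ha0 : a0 = 0 ∨ a0 = 1) (ha1 : a1 = 0 ∨ a1 = 1) (ha2 : a2 = 0 ∨ a2 = 1) (ha3 : a3 = 0 ∨ a3 = 1) (hb0 : b0 = 0 ∨ b0 = 1) (hb1 : b1 = 0 ∨ b1 = 1) (hb2 : b2 = 0 ∨ b2 = 1) (hb3 : b3 = 0 ∨ b3 = 1) :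
    PySem.Int.bor (a0 + 2 * a1 + 4 * a2 + 8 * a3) (b0 + 2 * b1 + 4 * b2 + 8 * b3)
      = PySem.Int.bor a0 b0 + 2 * PySem.Int.bor a1 b1 + 4 * PySem.Int.bor a2 b2 + 8 * PySem.Int.bor a3 b3 := by
  rcases ha0 with rfl|rfl <;> rcases ha1 with rfl|rfl <;> rcases ha2 with rfl|rfl <;> rcases ha3 with rfl|rfl <;> rcases hb0 with rfl|rfl <;> rcases hb1 with rfl|rfl <;> rcases hb2 with rfl|rfl <;> rcases hb3 with rfl|rfl <;> decide
theorem bxor_bits (a0 a1 a2 a3 b0 b1 b2 b3 : Int) (ha0 : a0 = 0 ∨ a0 = 1) (ha1 : a1 = 0 ∨ a1 = 1) (ha2 : a2 = 0 ∨ a2 = 1) (ha3 : a3 = 0 ∨ a3 = 1) (hb0 : b0 = 0 ∨ b0 = 1) (hb1 : b1 = 0 ∨ b1 = 1) (hb2 : b2 = 0 ∨ b2 = 1) (hb3 : b3 = 0 ∨ b3 = 1) :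
    PySem.Int.bxor (a0 + 2 * a1 + 4 * a2 + 8 * a3) (b0 + 2 * b1 + 4 * b2 + 8 * b3)
      = PySem.Int.bxor a0 b0 + 2 * PySem.Int.bxor a1 b1 + 4 * PySem.Int.bxor a2 b2 + 8 * PySem.Int.bxor a3 b3 := by
  rcases ha0 with rfl|rfl <;> rcases ha1 with rfl|rfl <;> rcases ha2 with rfl|rfl <;> rcases ha3 with rfl|rfl <;> rcases hb0 with rfl|rfl <;> rcases hb1 with rfl|rfl <;> rcases hb2 with rfl|rfl <;> rcases hb3 with rfl|rfl <;> decide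

theorem mem01 (l : List Int) (s : Int) (hall : ∀ v ∈ l, v = 0 ∨ v = 1) :
    (PySem.List.pyGet? l s).getD 0 = 0 ∨ (PySem.List.pyGet? l s).getD 0 = 1 := by
  cases h : PySem.List.pyGet? l s with
  | none => simp
  | some v => simpa using hall v (PySem.List.mem_of_pyGet?_eq_some _ h)

theorem logic_bit_01 (s a b : Int) (ha : a = 0 ∨ a = 1) (hb : b = 0 ∨ b = 1) :
    logic_bit_py s a b = 0 ∨ logic_bit_py s a b = 1 := by
  rcases ha with rfl|rfl <;> rcases hb with rfl|rfl
  · exact mem01 [1, 1, 0, 0, 1, 1, 0, 0, 1, 1, 0, 0, 1, 1, 0, 0] s (by decide)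
  · exact mem01 [1, 0, 1, 0, 1, 0, 1, 0, 1, 0, 1, 0, 1, 0, 1, 0] s (by decide)
  · exact mem01 [0, 0, 0, 0, 1, 1, 1, 1, 0, 0, 0, 0, 1, 1, 1, 1] s (by decide)
  · exact mem01 [0, 0, 0, 0, 0, 0, 0, 0, 1, 1, 1, 1, 1, 1, 1, 1] s (by decide)

theorem chain (L0 L1 L2 L3 : Int) (h0 : L0 = 0 ∨ L0 = 1) (h1 : L1 = 0 ∨ L1 = 1)
    (h2 : L2 = 0 ∨ L2 = 1) (h3 : L3 = 0 ∨ L3 = 1) :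
    PySem.Int.band (PySem.Int.bor (PySem.Int.bor (PySem.Int.bor (PySem.Int.bor 0 (L0 <<< ((0 : Int).toNat))) (L1 <<< ((1 : Int).toNat))) (L2 <<< ((2 : Int).toNat))) (L3 <<< ((3 : Int).toNat))) 15
      = L0 + 2 * L1 + 4 * L2 + 8 * L3 := by
  rcases h0 with rfl|rfl <;> rcases h1 with rfl|rfl <;> rcases h2 with rfl|rfl <;> rcases h3 with rfl|rfl <;> decide

theorem bitrw0 (x : Int) : PySem.Int.band (x >>> ((0 : Int).toNat)) 1 = x % 2 := by
  show PySem.Int.band (x >>> (0 : Nat)) 1 = x % 2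
  rw [PySem.Int.band_one, Int.shiftRight_eq_div_pow, PySem.Int.mod_eq_emod_of_pos (by norm_num)]; norm_num
theorem bitrw1 (x : Int) : PySem.Int.band (x >>> ((1 : Int).toNat)) 1 = x / 2 % 2 := by
  show PySem.Int.band (x >>> (1 : Nat)) 1 = x / 2 % 2
  rw [PySem.Int.band_one, Int.shiftRight_eq_div_pow, PySem.Int.mod_eq_emod_of_pos (by norm_num)]; norm_num
theorem bitrw2 (x : Int) : PySem.Int.band (x >>> ((2 : Int).toNat)) 1 = x / 4 % 2 := by
  show PySem.Int.band (x >>> (2 : Nat)) 1 = x / 4 % 2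
  rw [PySem.Int.band_one, Int.shiftRight_eq_div_pow, PySem.Int.mod_eq_emod_of_pos (by norm_num)]; norm_num
theorem bitrw3 (x : Int) : PySem.Int.band (x >>> ((3 : Int).toNat)) 1 = x / 8 % 2 := by
  show PySem.Int.band (x >>> (3 : Nat)) 1 = x / 8 % 2
  rw [PySem.Int.band_one, Int.shiftRight_eq_div_pow, PySem.Int.mod_eq_emod_of_pos (by norm_num)]; norm_num

theorem A_decomp (s x y : Int) :
    alu_logic_py s x y =
      logic_bit_py s (x % 2) (y % 2) + 2 * logic_bit_py s (x / 2 % 2) (y / 2 % 2)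
        + 4 * logic_bit_py s (x / 4 % 2) (y / 4 % 2) + 8 * logic_bit_py s (x / 8 % 2) (y / 8 % 2) := by
  unfold alu_logic_py
  have hr : PySem.List.pyRange 0 4 1 = [0, 1, 2, 3] := by decide
  rw [hr]
  simp only [List.foldl]
  rw [bitrw0, bitrw0, bitrw1, bitrw1, bitrw2, bitrw2, bitrw3, bitrw3]
  exact chain _ _ _ _ (logic_bit_01 s _ _ (by omega) (by omega)) (logic_bit_01 s _ _ (by omega) (by omega))
    (logic_bit_01 s _ _ (by omega) (by omega)) (logic_bit_01 s _ _ (by omega) (by omega))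

theorem core_eq (s a b : Int) (hs : -16 ≤ s ∧ s ≤ 15) :
    alu_logic_py s a b = alu_logic_py_alt s a b := by
  have hma : PySem.Int.mod a 16 = a % 16 := PySem.Int.mod_eq_emod_of_pos (by norm_num)
  have hmb : PySem.Int.mod b 16 = b % 16 := PySem.Int.mod_eq_emod_of_pos (by norm_num)
  rw [A_decomp]
  obtain ⟨a0, a1, a2, a3, hae0, hae1, hae2, hae3, has, ha0, ha1, ha2, ha3⟩ :
      ∃ v0 v1 v2 v3 : Int, a % 2 = v0 ∧ a / 2 % 2 = v1 ∧ a / 4 % 2 = v2 ∧ a / 8 % 2 = v3 ∧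
        a % 16 = v0 + 2 * v1 + 4 * v2 + 8 * v3 ∧ (v0 = 0 ∨ v0 = 1) ∧ (v1 = 0 ∨ v1 = 1) ∧ (v2 = 0 ∨ v2 = 1) ∧ (v3 = 0 ∨ v3 = 1) :=
    ⟨_, _, _, _, rfl, rfl, rfl, rfl, by omega, by omega, by omega, by omega, by omega⟩
  obtain ⟨b0, b1, b2, b3, hbe0, hbe1, hbe2, hbe3, hbs, hb0, hb1, hb2, hb3⟩ :
      ∃ u0 u1 u2 u3 : Int, b % 2 = u0 ∧ b / 2 % 2 = u1 ∧ b / 4 % 2 = u2 ∧ b / 8 % 2 = u3 ∧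
        b % 16 = u0 + 2 * u1 + 4 * u2 + 8 * u3 ∧ (u0 = 0 ∨ u0 = 1) ∧ (u1 = 0 ∨ u1 = 1) ∧ (u2 = 0 ∨ u2 = 1) ∧ (u3 = 0 ∨ u3 = 1) :=
    ⟨_, _, _, _, rfl, rfl, rfl, rfl, by omega, by omega, by omega, by omega, by omega⟩
  rw [hae0, hae1, hae2, hae3, hbe0, hbe1, hbe2, hbe3]
  have hv : s = -16 ∨ s = -15 ∨ s = -14 ∨ s = -13 ∨ s = -12 ∨ s = -11 ∨ s = -10 ∨ s = -9 ∨ s = -8 ∨ s = -7 ∨ s = -6 ∨ s = -5 ∨ s = -4 ∨ s = -3 ∨ s = -2 ∨ s = -1 ∨ s = 0 ∨ s = 1 ∨ s = 2 ∨ s = 3 ∨ s = 4 ∨ s = 5 ∨ s = 6 ∨ s = 7 ∨ s = 8 ∨ s = 9 ∨ s = 10 ∨ s = 11 ∨ s = 12 ∨ s = 13 ∨ s = 14 ∨ s = 15 := by omega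
  rcases hv with rfl|rfl|rfl|rfl|rfl|rfl|rfl|rfl|rfl|rfl|rfl|rfl|rfl|rfl|rfl|rfl|rfl|rfl|rfl|rfl|rfl|rfl|rfl|rfl|rfl|rfl|rfl|rfl|rfl|rfl|rfl|rfl
  · simp only [Lr_m16, Br_m16]
    try rw [hma, has]
    try ring
  · simp only [Lr_m15, Br_m15]
    try rw [hma, has, hmb, hbs]
    try rw [bor_bits a0 a1 a2 a3 b0 b1 b2 b3 (by omega) (by omega) (by omega) (by omega) (by omega) (by omega) (by omega) (by omega)]
    try ring
  · simp only [Lr_m14, Br_m14]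
    try rw [hma, has, hmb, hbs]
    try rw [show (15 - (a0 + 2 * a1 + 4 * a2 + 8 * a3)) = ((1 - a0) + 2 * (1 - a1) + 4 * (1 - a2) + 8 * (1 - a3)) from by ring]
    try rw [band_bits (1 - a0) (1 - a1) (1 - a2) (1 - a3) b0 b1 b2 b3 (by omega) (by omega) (by omega) (by omega) (by omega) (by omega) (by omega) (by omega)]
    try ring
  · simp only [Lr_m13, Br_m13]
    try ring
  · simp only [Lr_m12, Br_m12]
    try rw [hma, has, hmb, hbs]
    try rw [band_bits a0 a1 a2 a3 b0 b1 b2 b3 (by omega) (by omega) (by omega) (by omega) (by omega) (by omega) (by omega) (by omega)]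
    try ring
  · simp only [Lr_m11, Br_m11]
    try rw [hmb, hbs]
    try ring
  · simp only [Lr_m10, Br_m10]
    try rw [hma, has, hmb, hbs]
    try rw [bxor_bits a0 a1 a2 a3 b0 b1 b2 b3 (by omega) (by omega) (by omega) (by omega) (by omega) (by omega) (by omega) (by omega)]
    try ring
  · simp only [Lr_m9, Br_m9]
    try rw [hma, has, hmb, hbs]
    try rw [show (15 - (b0 + 2 * b1 + 4 * b2 + 8 * b3)) = ((1 - b0) + 2 * (1 - b1) + 4 * (1 - b2) + 8 * (1 - b3)) from by ring]
    try rw [band_bits a0 a1 a2 a3 (1 - b0) (1 - b1) (1 - b2) (1 - b3) (by omega) (by omega) (by omega) (by omega) (by omega) (by omega) (by omega) (by omega)]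
    try ring
  · simp only [Lr_m8, Br_m8]
    try rw [hma, has, hmb, hbs]
    try rw [show (15 - (a0 + 2 * a1 + 4 * a2 + 8 * a3)) = ((1 - a0) + 2 * (1 - a1) + 4 * (1 - a2) + 8 * (1 - a3)) from by ring]
    try rw [bor_bits (1 - a0) (1 - a1) (1 - a2) (1 - a3) b0 b1 b2 b3 (by omega) (by omega) (by omega) (by omega) (by omega) (by omega) (by omega) (by omega)]
    try ring
  · simp only [Lr_m7, Br_m7]
    try rw [hma, has, hmb, hbs]
    try rw [bxor_bits a0 a1 a2 a3 b0 b1 b2 b3 (by omega) (by omega) (by omega) (by omega) (by omega) (by omega) (by omega) (by omega)]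
    try ring
  · simp only [Lr_m6, Br_m6]
    try rw [hmb, hbs]
    try ring
  · simp only [Lr_m5, Br_m5]
    try rw [hma, has, hmb, hbs]
    try rw [band_bits a0 a1 a2 a3 b0 b1 b2 b3 (by omega) (by omega) (by omega) (by omega) (by omega) (by omega) (by omega) (by omega)]
    try ring
  · simp only [Lr_m4, Br_m4]
    try ring
  · simp only [Lr_m3, Br_m3]
    try rw [hma, has, hmb, hbs]
    try rw [show (15 - (b0 + 2 * b1 + 4 * b2 + 8 * b3)) = ((1 - b0) + 2 * (1 - b1) + 4 * (1 - b2) + 8 * (1 - b3)) from by ring]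
    try rw [bor_bits a0 a1 a2 a3 (1 - b0) (1 - b1) (1 - b2) (1 - b3) (by omega) (by omega) (by omega) (by omega) (by omega) (by omega) (by omega) (by omega)]
    try ring
  · simp only [Lr_m2, Br_m2]
    try rw [hma, has, hmb, hbs]
    try rw [bor_bits a0 a1 a2 a3 b0 b1 b2 b3 (by omega) (by omega) (by omega) (by omega) (by omega) (by omega) (by omega) (by omega)]
    try ring
  · simp only [Lr_m1, Br_m1]
    try rw [hma, has]
    try ring
  · simp only [Lr_0, Br_0]
    try rw [hma, has]
    try ring
  · simp only [Lr_1, Br_1]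
    try rw [hma, has, hmb, hbs]
    try rw [bor_bits a0 a1 a2 a3 b0 b1 b2 b3 (by omega) (by omega) (by omega) (by omega) (by omega) (by omega) (by omega) (by omega)]
    try ring
  · simp only [Lr_2, Br_2]
    try rw [hma, has, hmb, hbs]
    try rw [show (15 - (a0 + 2 * a1 + 4 * a2 + 8 * a3)) = ((1 - a0) + 2 * (1 - a1) + 4 * (1 - a2) + 8 * (1 - a3)) from by ring]
    try rw [band_bits (1 - a0) (1 - a1) (1 - a2) (1 - a3) b0 b1 b2 b3 (by omega) (by omega) (by omega) (by omega) (by omega) (by omega) (by omega) (by omega)]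
    try ring
  · simp only [Lr_3, Br_3]
    try ring
  · simp only [Lr_4, Br_4]
    try rw [hma, has, hmb, hbs]
    try rw [band_bits a0 a1 a2 a3 b0 b1 b2 b3 (by omega) (by omega) (by omega) (by omega) (by omega) (by omega) (by omega) (by omega)]
    try ring
  · simp only [Lr_5, Br_5]
    try rw [hmb, hbs]
    try ring
  · simp only [Lr_6, Br_6]
    try rw [hma, has, hmb, hbs]
    try rw [bxor_bits a0 a1 a2 a3 b0 b1 b2 b3 (by omega) (by omega) (by omega) (by omega) (by omega) (by omega) (by omega) (by omega)]
    try ring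
  · simp only [Lr_7, Br_7]
    try rw [hma, has, hmb, hbs]
    try rw [show (15 - (b0 + 2 * b1 + 4 * b2 + 8 * b3)) = ((1 - b0) + 2 * (1 - b1) + 4 * (1 - b2) + 8 * (1 - b3)) from by ring]
    try rw [band_bits a0 a1 a2 a3 (1 - b0) (1 - b1) (1 - b2) (1 - b3) (by omega) (by omega) (by omega) (by omega) (by omega) (by omega) (by omega) (by omega)]
    try ring
  · simp only [Lr_8, Br_8]
    try rw [hma, has, hmb, hbs]
    try rw [show (15 - (a0 + 2 * a1 + 4 * a2 + 8 * a3)) = ((1 - a0) + 2 * (1 - a1) + 4 * (1 - a2) + 8 * (1 - a3)) from by ring]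
    try rw [bor_bits (1 - a0) (1 - a1) (1 - a2) (1 - a3) b0 b1 b2 b3 (by omega) (by omega) (by omega) (by omega) (by omega) (by omega) (by omega) (by omega)]
    try ring
  · simp only [Lr_9, Br_9]
    try rw [hma, has, hmb, hbs]
    try rw [bxor_bits a0 a1 a2 a3 b0 b1 b2 b3 (by omega) (by omega) (by omega) (by omega) (by omega) (by omega) (by omega) (by omega)]
    try ring
  · simp only [Lr_10, Br_10]
    try rw [hmb, hbs]
    try ring
  · simp only [Lr_11, Br_11]
    try rw [hma, has, hmb, hbs]
    try rw [band_bits a0 a1 a2 a3 b0 b1 b2 b3 (by omega) (by omega) (by omega) (by omega) (by omega) (by omega) (by omega) (by omega)]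
    try ring
  · simp only [Lr_12, Br_12]
    try ring
  · simp only [Lr_13, Br_13]
    try rw [hma, has, hmb, hbs]
    try rw [show (15 - (b0 + 2 * b1 + 4 * b2 + 8 * b3)) = ((1 - b0) + 2 * (1 - b1) + 4 * (1 - b2) + 8 * (1 - b3)) from by ring]
    try rw [bor_bits a0 a1 a2 a3 (1 - b0) (1 - b1) (1 - b2) (1 - b3) (by omega) (by omega) (by omega) (by omega) (by omega) (by omega) (by omega) (by omega)]
    try ring
  · simp only [Lr_14, Br_14]
    try rw [hma, has, hmb, hbs]
    try rw [bor_bits a0 a1 a2 a3 b0 b1 b2 b3 (by omega) (by omega) (by omega) (by omega) (by omega) (by omega) (by omega) (by omega)]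
    try ring
  · simp only [Lr_15, Br_15]
    try rw [hma, has]
    try ring

-- ===== VERDICT (by name: the statement is the Claim_ definition above) =====
theorem alu_logic_py_spec : Claim_equal_alu_logic_py := by
  intro s a b _ hpre
  unfold Spec_alu_logic_py
  exact core_eq s a b hpre
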